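-- pv_equiv track=rewrite | github.com/VovaSamm/tack1 | IT-Academy/lesson_15/task_2.1_from_function.py | rangr_from_one_two_tree
-- ===== SOURCE A (Python) =====
-- def rangr_from_one_two_tree(number):
--     count = 0
--     value_runge = 0
--     while count < number:
--         if value_runge == 3:
--             value_runge = 1
--         else:
--             value_runge += 1
--         count += 1
--         yield value_runge
-- ===== SOURCE B (Python) =====
-- def rangr_from_one_two_tree(number):
--     for i in range(number):
--         yield i % 3 + 1
-- ===== Notes on version B (the rewrite author's own statement) =====
-- stated objective: simpler
-- what changed: Replaces the stepped counter with its conditional reset branch by a stateless index loop that computes each element directly from its position by a modulo formula.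
import Mathlib
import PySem

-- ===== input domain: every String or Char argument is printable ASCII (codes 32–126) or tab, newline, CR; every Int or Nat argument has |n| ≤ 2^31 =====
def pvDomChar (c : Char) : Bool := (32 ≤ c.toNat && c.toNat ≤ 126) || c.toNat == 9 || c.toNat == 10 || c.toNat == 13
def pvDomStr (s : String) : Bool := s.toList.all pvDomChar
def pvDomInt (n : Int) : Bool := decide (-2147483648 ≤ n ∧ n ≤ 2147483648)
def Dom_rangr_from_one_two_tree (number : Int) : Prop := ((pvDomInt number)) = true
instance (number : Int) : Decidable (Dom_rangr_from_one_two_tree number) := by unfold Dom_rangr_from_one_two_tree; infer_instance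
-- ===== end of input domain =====

-- B replaces A's stepped counter (with its conditional reset branch) by a stateless
-- index loop computing each element directly from its position (objective: simpler).

-- ===== PORT A =====
-- while count < number: step value_runge (with the conditional reset), yield it.
-- The loop runs max(number,0) = number.toNat times; fuel = remaining iterations.
def rangrAuxA : Nat → Int → List Int
  | 0, _ => []
  | Nat.succ n, v =>
    let v' : Int := if v = 3 then 1 else v + 1
    v' :: rangrAuxA n v'

def rangr_from_one_two_tree (number : Int) : List Int :=
  rangrAuxA number.toNat 0

-- ===== PORT B =====
-- for i in range(number): yield i % 3 + 1
def rangr_from_one_two_tree_alt (number : Int) : List Int :=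
  (PySem.List.pyRange 0 number 1).map (fun i => PySem.Int.mod i 3 + 1)

-- ===== PRECONDITION & SPEC =====
def Spec_rangr_from_one_two_tree (number : Int) (out : List Int) : Prop := out = rangr_from_one_two_tree_alt number
instance (number : Int) (out : List Int) : Decidable (Spec_rangr_from_one_two_tree number out) := by unfold Spec_rangr_from_one_two_tree; infer_instance

-- ===== CLAIM (what is proved, stated in full; the proofs are below) =====
def Claim_equal_rangr_from_one_two_tree : Prop := ∀ (number : Int), Dom_rangr_from_one_two_tree number → Spec_rangr_from_one_two_tree number (rangr_from_one_two_tree number)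

-- ===== LEMMAS AND PROOFS =====

-- The state value_runge after j completed iterations.
def vOf (j : Nat) : Int := if j = 0 then 0 else ((j - 1) % 3 : Nat) + 1

lemma vOf_step (j : Nat) :
    (if vOf j = 3 then (1 : Int) else vOf j + 1) = vOf (j + 1) := by
  unfold vOf
  rcases j with _ | m
  · norm_num
  · have hm : m % 3 < 3 := Nat.mod_lt _ (by norm_num)
    simp only [Nat.succ_ne_zero, if_false, Nat.add_sub_cancel]
    by_cases h : m % 3 = 2
    · have : (m + 1) % 3 = 0 := by omega
      simp [h, this]
    · have h1 : (m + 1) % 3 = m % 3 + 1 := by omega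
      have h2 : ((m % 3 : Nat) : Int) + 1 ≠ 3 := by
        intro hc
        have : m % 3 = 2 := by exact_mod_cast (by linarith : ((m % 3 : Nat) : Int) = 2)
        exact h this
      rw [if_neg h2, h1]
      push_cast
      ring

lemma rangrAuxA_eq (n : Nat) : ∀ j : Nat,
    rangrAuxA n (vOf j) = (List.range n).map (fun k => (((j + k) % 3 : Nat) : Int) + 1) := by
  induction n with
  | zero => intro j; simp [rangrAuxA]
  | succ n ih =>
    intro j
    simp only [rangrAuxA]
    rw [vOf_step j, ih (j + 1), List.range_succ_eq_map, List.map_cons, List.map_map]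
    congr 1
    apply List.map_congr_left
    intro k _
    simp only [Function.comp]
    congr 2
    omega

-- ===== VERDICT (by name: the statement is the Claim_ definition above) =====
theorem rangr_from_one_two_tree_spec : Claim_equal_rangr_from_one_two_tree := by
  intro number _
  unfold Spec_rangr_from_one_two_tree rangr_from_one_two_tree rangr_from_one_two_tree_alt
  rw [PySem.List.pyRange_one, List.map_map]
  calc rangrAuxA number.toNat 0
      = rangrAuxA number.toNat (vOf 0) := rfl
    _ = (List.range number.toNat).map (fun k => (((0 + k) % 3 : Nat) : Int) + 1) :=
        rangrAuxA_eq number.toNat 0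
    _ = _ := by
        simp only [Int.sub_zero]
        apply List.map_congr_left
        intro k _
        simp [Function.comp]
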